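-- pv_equiv track=rewrite | github.com/saareliad/FTPipe | pytorch_Gpipe/model_profiling/control_flow_graph.py | partial_scopes
-- ===== SOURCE A (Python) =====
-- def partial_scopes(old_scopes):
--     partials = dict()
--     for scope in old_scopes:
--         base = "__module"
--         new_base = ""
--         for part in scope.split("/"):
--             identifier = part[part.find("[") + 1:-1]
--             new_base += f"/{part}"
--             partials[base] = new_base[1:]
--             base += f".{identifier}"
--     return partials
-- ===== SOURCE B (Python) =====
-- def partial_scopes(old_scopes):
--     partials = dict()
--     for scope in old_scopes:
--         parts = scope.split("/")
--         identifiers = [p[p.find("[") + 1:-1] for p in parts]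
--         for i in range(len(parts)):
--             base = "__module" + "".join("." + ident for ident in identifiers[:i])
--             partials[base] = "/".join(parts[:i + 1])
--     return partials
-- ===== Notes on version B (the rewrite author's own statement) =====
-- stated objective: alternative
-- what changed: B replaces A's two threaded string accumulators (base, new_base) with a precomputed identifier list and direct reconstruction of each prefix key/value from slices and joins at every prefix index.
import Mathlib
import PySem

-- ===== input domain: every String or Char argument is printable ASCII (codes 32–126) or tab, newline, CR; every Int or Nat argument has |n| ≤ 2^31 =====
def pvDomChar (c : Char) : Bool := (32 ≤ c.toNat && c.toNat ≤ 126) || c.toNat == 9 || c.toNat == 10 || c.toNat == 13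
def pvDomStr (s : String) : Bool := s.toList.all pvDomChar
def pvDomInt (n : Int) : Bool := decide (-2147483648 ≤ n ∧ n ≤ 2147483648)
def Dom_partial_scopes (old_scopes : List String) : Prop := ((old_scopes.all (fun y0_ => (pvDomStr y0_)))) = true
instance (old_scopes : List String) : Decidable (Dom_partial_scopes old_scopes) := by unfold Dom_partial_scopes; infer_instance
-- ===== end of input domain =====

-- B rebuilds each prefix key/value directly from index slices of the split parts instead of
-- threading two string accumulators through the inner loop (objective: alternative decomposition).

-- ===== PORT A =====
-- A: for each scope, thread (base, new_base) accumulators over the parts, inserting as it goes.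
def partial_scopes (old_scopes : List String) : List (String × String) :=
  (old_scopes.foldl
    (fun partials scope =>
      (((PySem.Str.split? scope "/").getD []).foldl
        (fun (st : String × String × PySem.Dict String String) part =>
          let identifier := PySem.Str.slice part (some (PySem.Str.find part "[" + 1)) (some (-1))
          let new_base := st.2.1 ++ ("/" ++ part)
          let partials' := st.2.2.insert st.1 (PySem.Str.slice new_base (some 1) none)
          (st.1 ++ ("." ++ identifier), new_base, partials'))
        ("__module", "", partials)).2.2)
    PySem.Dict.empty).items

-- ===== PORT B =====
-- B: precompute parts and identifiers, then build each key/value from slices at each prefix index.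
def partial_scopes_alt (old_scopes : List String) : List (String × String) :=
  (old_scopes.foldl
    (fun partials scope =>
      let parts := (PySem.Str.split? scope "/").getD []
      let identifiers := parts.map
        (fun p => PySem.Str.slice p (some (PySem.Str.find p "[" + 1)) (some (-1)))
      (PySem.List.pyRange 0 (parts.length : Int) 1).foldl
        (fun partials i =>
          let base := "__module" ++
            PySem.Str.join "" ((PySem.List.slice identifiers none (some i)).map
              (fun ident => "." ++ ident))
          partials.insert base
            (PySem.Str.join "/" (PySem.List.slice parts none (some (i + 1)))))
        partials)
    PySem.Dict.empty).items

-- ===== PRECONDITION & SPEC =====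
def Spec_partial_scopes (old_scopes : List String) (out : List (String × String)) : Prop := out = partial_scopes_alt old_scopes
instance (old_scopes : List String) (out : List (String × String)) : Decidable (Spec_partial_scopes old_scopes out) := by unfold Spec_partial_scopes; infer_instance

-- ===== CLAIM (what is proved, stated in full; the proofs are below) =====
def Claim_equal_partial_scopes : Prop := ∀ (old_scopes : List String), Dom_partial_scopes old_scopes → Spec_partial_scopes old_scopes (partial_scopes old_scopes)

-- ===== LEMMAS AND PROOFS =====

-- the shared per-part identifier expression
def psIdent (p : String) : String :=
  PySem.Str.slice p (some (PySem.Str.find p "[" + 1)) (some (-1))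

-- A's inner loop, named
def innerA (parts : List String) (st : String × String × PySem.Dict String String) :
    String × String × PySem.Dict String String :=
  parts.foldl
    (fun st part =>
      (st.1 ++ ("." ++ psIdent part), st.2.1 ++ ("/" ++ part),
        st.2.2.insert st.1 (PySem.Str.slice (st.2.1 ++ ("/" ++ part)) (some 1) none)))
    st

-- the (key, value) pairs A inserts, as a list
def pairsA : String → String → List String → List (String × String)
  | _, _, [] => []
  | base, nb, p :: ps =>
    (base, PySem.Str.slice (nb ++ ("/" ++ p)) (some 1) none) ::
      pairsA (base ++ ("." ++ psIdent p)) (nb ++ ("/" ++ p)) ps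

def baseAfter (b : String) (qs : List String) : String :=
  qs.foldl (fun a p => a ++ ("." ++ psIdent p)) b

def nbAfter (b : String) (qs : List String) : String :=
  qs.foldl (fun a p => a ++ ("/" ++ p)) b

theorem innerA_dict (parts : List String) :
    ∀ (base nb : String) (d : PySem.Dict String String),
      (innerA parts (base, nb, d)).2.2 =
        (pairsA base nb parts).foldl (fun d kv => d.insert kv.1 kv.2) d := by
  induction parts with
  | nil => intro base nb d; simp [innerA, pairsA]
  | cons p ps ih =>
    intro base nb d
    simp only [innerA, List.foldl_cons, pairsA] at *
    exact ih _ _ _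

theorem join_nil_str : PySem.Str.join "" ([] : List String) = "" := by
  apply String.toList_inj.mp
  simp [PySem.Chars.join, List.intercalate]

theorem join_empty_cons (x : String) (l : List String) :
    PySem.Str.join "" (x :: l) = x ++ PySem.Str.join "" l := by
  apply String.toList_inj.mp
  cases l with
  | nil => simp [PySem.Chars.join, List.intercalate]
  | cons y l => simp [PySem.Chars.join, List.intercalate]

theorem join_slash_singleton (x : String) : PySem.Str.join "/" [x] = x := by
  apply String.toList_inj.mp
  simp [PySem.Chars.join, List.intercalate]

theorem join_slash_cons (x y : String) (l : List String) :
    PySem.Str.join "/" (x :: y :: l) = x ++ ("/" ++ PySem.Str.join "/" (y :: l)) := by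
  apply String.toList_inj.mp
  cases l <;> simp [PySem.Chars.join, List.intercalate, List.intersperse]

theorem slice_one_slash (s : String) :
    PySem.Str.slice ("/" ++ s) (some 1) none = s := by
  apply String.toList_inj.mp
  simp [PySem.List.slice_from_one]

-- prefix path "/p0/p1/…" in closed form
def prePath (qs : List String) : String :=
  PySem.Str.join "" (qs.map (fun q => "/" ++ q))

theorem nbAfter_eq (qs : List String) :
    ∀ s : String, nbAfter s qs = s ++ prePath qs := by
  induction qs with
  | nil => intro s; simp [nbAfter, prePath, join_nil_str]
  | cons q qs ih =>
    intro s
    simp only [nbAfter, List.foldl_cons, prePath, List.map_cons, join_empty_cons] at *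
    rw [ih, String.append_assoc]

theorem prePath_cons (q : String) (qs : List String) :
    prePath (q :: qs) = "/" ++ PySem.Str.join "/" (q :: qs) := by
  induction qs generalizing q with
  | nil =>
    simp [prePath, join_empty_cons, join_nil_str, join_slash_singleton]
  | cons q' qs ih =>
    simp only [prePath, List.map_cons, join_empty_cons] at *
    rw [ih q', join_slash_cons, ← String.append_assoc, ← String.append_assoc,
      String.append_assoc]

theorem baseAfter_eq (qs : List String) :
    ∀ b : String,
      baseAfter b qs = b ++ PySem.Str.join "" (qs.map (fun p => "." ++ psIdent p)) := by
  induction qs with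
  | nil => intro b; simp [baseAfter, join_nil_str]
  | cons q qs ih =>
    intro b
    simp only [baseAfter, List.foldl_cons, List.map_cons, join_empty_cons] at *
    rw [ih, String.append_assoc]

theorem pairsA_closed (parts : List String) :
    ∀ (base nb : String),
      pairsA base nb parts =
        (List.range parts.length).map
          (fun i => (baseAfter base (parts.take i),
            PySem.Str.slice (nbAfter nb (parts.take (i + 1))) (some 1) none)) := by
  induction parts with
  | nil => intro base nb; simp [pairsA]
  | cons p ps ih =>
    intro base nb
    rw [pairsA, ih, List.length_cons, List.range_succ_eq_map]
    simp only [List.map_cons, List.map_map]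
    congr 1

-- the per-scope step functions of the two ports agree
theorem inner_eq (d : PySem.Dict String String) (ps0 : List String) :
    (ps0.foldl
        (fun (st : String × String × PySem.Dict String String) part =>
          let identifier := PySem.Str.slice part (some (PySem.Str.find part "[" + 1)) (some (-1))
          let new_base := st.2.1 ++ ("/" ++ part)
          let partials' := st.2.2.insert st.1 (PySem.Str.slice new_base (some 1) none)
          (st.1 ++ ("." ++ identifier), new_base, partials'))
        ("__module", "", d)).2.2 =
      (PySem.List.pyRange 0 (ps0.length : Int) 1).foldl
        (fun partials i =>
          let base := "__module" ++
            PySem.Str.join "" ((PySem.List.slice ((ps0.map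
              (fun p => PySem.Str.slice p (some (PySem.Str.find p "[" + 1)) (some (-1))))) none (some i)).map
              (fun ident => "." ++ ident))
          partials.insert base
            (PySem.Str.join "/" (PySem.List.slice ps0 none (some (i + 1)))))
        d := by
  rw [show (ps0.foldl
      (fun (st : String × String × PySem.Dict String String) part =>
        let identifier := PySem.Str.slice part (some (PySem.Str.find part "[" + 1)) (some (-1))
        let new_base := st.2.1 ++ ("/" ++ part)
        let partials' := st.2.2.insert st.1 (PySem.Str.slice new_base (some 1) none)
        (st.1 ++ ("." ++ identifier), new_base, partials'))
      ("__module", "", d)) = innerA ps0 ("__module", "", d) from rfl,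
    innerA_dict, pairsA_closed]
  rw [PySem.List.pyRange_one]
  simp only [Int.sub_zero, Int.toNat_natCast, zero_add, List.foldl_map]
  apply List.foldl_ext
  intro d' i hi
  rw [List.mem_range] at hi
  show d'.insert (baseAfter "__module" (ps0.take i))
      (PySem.Str.slice (nbAfter "" (ps0.take (i + 1))) (some 1) none) = _
  have h1 : ((i : Int) + 1) = ((i + 1 : Nat) : Int) := by push_cast; ring
  simp only [h1, PySem.List.slice_to_natCast, List.map_take, List.map_map]
  congr 1
  · rw [baseAfter_eq]
    congr 1
    rw [← List.map_take]
    simp [Function.comp_def, psIdent]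
  · obtain ⟨p, rest, rfl⟩ : ∃ p rest, ps0 = p :: rest := by
      cases ps0 with
      | nil => simp at hi
      | cons p rest => exact ⟨p, rest, rfl⟩
    rw [List.take_succ_cons, nbAfter_eq, prePath_cons, String.empty_append, slice_one_slash]

-- ===== VERDICT (by name: the statement is the Claim_ definition above) =====
theorem partial_scopes_spec : Claim_equal_partial_scopes := by
  unfold Claim_equal_partial_scopes
  intro old_scopes _
  unfold Spec_partial_scopes partial_scopes partial_scopes_alt
  congr 1
  apply List.foldl_ext
  intro d scope _
  exact inner_eq d ((PySem.Str.split? scope "/").getD [])
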